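-- pv_equiv track=rewrite | github.com/Discovery-IDRs/predIDR | src/features.py | get_pair_repeat_count
-- ===== SOURCE A (Python) =====
-- def get_pair_repeat_count(seq, XY):
--     """Return count of pair symbols contained in XY
--     in seq which appear two or more times in a row.
--
--     Parameters
--     ----------
--         seq : string
--             Protein sequence as string.
--         XY : string or list
--             Pair symbols to count for repeats.
--             Must contain at least two symbols.
--
--     Returns
--     -------
--         pair_repeat_count : int
--             Count of repeat pair symbols in seq.
--     """
--
--     if len(XY) < 2:
--         raise ValueError('Requires at least two symbols.')
--
--     pair_repeat_count = 0
--
--     if len(seq) <= 1: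
--         return 0
--     else:
--         pass
--
--     if seq[0] in XY:
--         if seq[1] in XY:
--             pair_repeat_count += 1
--         else:
--             pass
--     else:
--         pass
--
--     if seq[len(seq) - 1] in XY:
--         if seq[len(seq) - 2] in XY:
--             pair_repeat_count += 1
--         else:
--             pass
--     else:
--         pass
--
--     if len(seq) > 2:
--         for i in range(1, len(seq) - 1):
--             if seq[i] in XY:
--                 if seq[i-1] in XY:
--                     pair_repeat_count += 1
--                 elif seq[i+1] in XY:
--                     pair_repeat_count += 1
--                 else:
--                     pass
--             else:
--                 pass
--     else:
--         pass
--
--     return pair_repeat_count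
-- ===== SOURCE B (Python) =====
-- def get_pair_repeat_count(seq, XY):
--     """Count symbols of XY in seq that sit in a run of >= 2 consecutive
--     XY-symbols: accumulate maximal run lengths in one pass."""
--     if len(XY) < 2:
--         raise ValueError('Requires at least two symbols.')
--     total = 0
--     run = 0
--     for c in seq:
--         if c in XY:
--             run += 1
--         else:
--             if run >= 2:
--                 total += run
--             run = 0
--     if run >= 2:
--         total += run
--     return total
-- ===== Notes on version B (the rewrite author's own statement) =====
-- stated objective: simpler
-- what changed: Replaces A's three-part per-index neighbour check (separate first/last/middle cases with lookbehind and lookahead) by a single pass that accumulates the lengths of maximal runs of XY-symbols and adds each run of length >= 2.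
import Mathlib
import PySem

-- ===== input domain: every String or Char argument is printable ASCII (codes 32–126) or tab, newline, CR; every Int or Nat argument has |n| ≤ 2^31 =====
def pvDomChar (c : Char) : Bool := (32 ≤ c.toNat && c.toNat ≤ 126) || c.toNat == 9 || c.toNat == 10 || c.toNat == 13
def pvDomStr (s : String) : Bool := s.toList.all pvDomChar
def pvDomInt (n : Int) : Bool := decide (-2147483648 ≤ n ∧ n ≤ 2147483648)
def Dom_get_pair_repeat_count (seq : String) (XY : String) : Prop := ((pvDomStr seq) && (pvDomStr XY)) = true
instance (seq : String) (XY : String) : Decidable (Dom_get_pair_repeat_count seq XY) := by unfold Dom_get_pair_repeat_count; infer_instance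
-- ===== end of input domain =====

-- B replaces A's three-part per-index neighbour check by one pass accumulating maximal XY-run lengths (objective: simpler).

-- Python 'c in XY' for a single character c and a string XY is exactly character membership.
def pvInXY (c : Char) (XY : String) : Bool := XY.toList.contains c

-- ===== PORT A =====
-- indices 0, 1, n-1, n-2 and i-1, i, i+1 are all in range on the branches that read them,
-- so Python's seq[j] is ported as PySem.List.pyGetD (exact there).
def get_pair_repeat_count (seq : String) (XY : String) : Int :=
  if XY.toList.length < 2 then 0   -- Python raises ValueError here; excluded by Pre_
  else
    let s := seq.toList
    let n := s.length
    if n ≤ 1 then 0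
    else
      let c1 : Int := if pvInXY (PySem.List.pyGetD s 0 ' ') XY then
          (if pvInXY (PySem.List.pyGetD s 1 ' ') XY then 1 else 0) else 0
      let c2 : Int := c1 + (if pvInXY (PySem.List.pyGetD s ((n : Int) - 1) ' ') XY then
          (if pvInXY (PySem.List.pyGetD s ((n : Int) - 2) ' ') XY then 1 else 0) else 0)
      if 2 < n then
        (PySem.List.pyRange 1 ((n : Int) - 1) 1).foldl (fun acc i =>
          if pvInXY (PySem.List.pyGetD s i ' ') XY then
            (if pvInXY (PySem.List.pyGetD s (i - 1) ' ') XY then acc + 1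
             else if pvInXY (PySem.List.pyGetD s (i + 1) ' ') XY then acc + 1
             else acc)
          else acc) c2
      else c2

-- ===== PORT B =====
def get_pair_repeat_count_alt (seq : String) (XY : String) : Int :=
  if XY.toList.length < 2 then 0   -- Python raises ValueError here; excluded by Pre_
  else
    let st := seq.toList.foldl (fun (st : Int × Int) c =>
        if pvInXY c XY then (st.1, st.2 + 1)
        else ((if 2 ≤ st.2 then st.1 + st.2 else st.1), 0)) (0, 0)
    if 2 ≤ st.2 then st.1 + st.2 else st.1

-- ===== PRECONDITION & SPEC =====
-- Pre_ excludes exactly the inputs with len(XY) < 2, on which Python A raises ValueError.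
def Pre_get_pair_repeat_count (seq : String) (XY : String) : Prop := 2 ≤ XY.toList.length
instance (seq : String) (XY : String) : Decidable (Pre_get_pair_repeat_count seq XY) := by unfold Pre_get_pair_repeat_count; infer_instance
def pvWitness_get_pair_repeat_count : String × String := ("AABCBB", "AB")

def Spec_get_pair_repeat_count (seq : String) (XY : String) (out : Int) : Prop := out = get_pair_repeat_count_alt seq XY
instance (seq : String) (XY : String) (out : Int) : Decidable (Spec_get_pair_repeat_count seq XY out) := by unfold Spec_get_pair_repeat_count; infer_instance

-- ===== CLAIM (what is proved, stated in full; the proofs are below) =====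
def Claim_equal_get_pair_repeat_count : Prop := ∀ (seq : String) (XY : String), Dom_get_pair_repeat_count seq XY → Pre_get_pair_repeat_count seq XY → Spec_get_pair_repeat_count seq XY (get_pair_repeat_count seq XY)

-- ===== LEMMAS AND PROOFS =====

-- proof-side: per-position "true with a true neighbour" count, carrying the previous flag
def pvG : Bool → List Bool → Int
  | _, [] => 0
  | prev, x :: t => (if x && (prev || t.headD false) then 1 else 0) + pvG x t

def pvH : Int → List Bool → Int
  | r, [] => if 2 ≤ r then r else 0
  | r, x :: t => if x then pvH (r + 1) t else (if 2 ≤ r then r else 0) + pvH 0 t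

theorem pvB_loop (XY : String) (l : List Char) (t r : Int) :
    (let st := l.foldl (fun (st : Int × Int) c =>
        if pvInXY c XY then (st.1, st.2 + 1)
        else ((if 2 ≤ st.2 then st.1 + st.2 else st.1), 0)) (t, r)
     if 2 ≤ st.2 then st.1 + st.2 else st.1)
    = t + pvH r (l.map (fun c => pvInXY c XY)) := by
  induction l generalizing t r with
  | nil =>
    simp only [List.foldl_nil, List.map_nil, pvH]
    by_cases hr : (2 : Int) ≤ r <;> simp [hr]
  | cons c l ih =>
    simp only [List.foldl_cons, List.map_cons, pvH]
    by_cases h : pvInXY c XY = true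
    · simp only [h, if_pos rfl, if_true]
      exact ih t (r + 1)
    · simp only [Bool.not_eq_true] at h
      simp only [h, Bool.false_eq_true, if_false]
      rw [ih]
      by_cases hr : (2 : Int) ≤ r <;> simp [hr] <;> ring

theorem pvH_eq_pvG (l : List Bool) (r : Int) (hr : 0 ≤ r) :
    pvH r l = (if 2 ≤ r + (if l.headD false then 1 else 0) then r else 0) + pvG (decide (1 ≤ r)) l := by
  induction l generalizing r with
  | nil => simp [pvH, pvG]
  | cons x t ih =>
    cases x with
    | true =>
      simp only [pvH, pvG, if_true]
      rw [ih (r + 1) (by omega)]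
      by_cases h1 : (1:Int) ≤ r
      · rw [decide_eq_true (show (1:Int) ≤ r + 1 by omega), decide_eq_true h1]
        have ha : (2:Int) ≤ r + 1 := by omega
        cases hh : t.headD false <;>
          simp [hh, if_pos ha, if_pos (show (2:Int) ≤ r + 1 + 1 by omega)] <;> ring
      · have h0 : r = 0 := by omega
        subst h0
        rw [decide_eq_true (show (1:Int) ≤ 0 + 1 by norm_num), decide_eq_false h1]
        cases hh : t.headD false <;> simp [hh] <;> norm_num
    | false =>
      simp only [pvH, pvG, Bool.false_and, Bool.false_eq_true, if_false]
      rw [ih 0 le_rfl]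
      cases t <;> simp [pvG] <;> split <;> split <;> linarith

theorem pvG_sum (l : List Bool) (prev : Bool) :
    pvG prev l = ((List.range l.length).map (fun i =>
      if l.getD i false && ((if i = 0 then prev else l.getD (i - 1) false) || l.getD (i + 1) false)
      then (1 : Int) else 0)).sum := by
  induction l generalizing prev with
  | nil => simp [pvG]
  | cons x t ih =>
    simp only [pvG, List.length_cons, List.range_succ_eq_map, List.map_cons, List.map_map, List.sum_cons]
    congr 1
    · cases t <;> simp
    · rw [ih x]
      congr 1
      apply List.map_congr_left
      intro i hi
      rcases i with _ | j <;> simp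

theorem pvMemGetD (s : List Char) (XY : String) (j : Nat) (h : j < s.length) :
    (s.map (fun c => pvInXY c XY)).getD j false = pvInXY (s.getD j ' ') XY := by
  rw [List.getD_eq_getElem _ _ (by simpa using h), List.getD_eq_getElem _ _ h, List.getElem_map]

theorem pvA_main (s : List Char) (XY : String) (h2 : 2 ≤ s.length) :
    (let n := s.length
     let c1 : Int := if pvInXY (PySem.List.pyGetD s 0 ' ') XY then
         (if pvInXY (PySem.List.pyGetD s 1 ' ') XY then 1 else 0) else 0
     let c2 : Int := c1 + (if pvInXY (PySem.List.pyGetD s ((n : Int) - 1) ' ') XY then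
         (if pvInXY (PySem.List.pyGetD s ((n : Int) - 2) ' ') XY then 1 else 0) else 0)
     if 2 < n then
       (PySem.List.pyRange 1 ((n : Int) - 1) 1).foldl (fun acc i =>
         if pvInXY (PySem.List.pyGetD s i ' ') XY then
           (if pvInXY (PySem.List.pyGetD s (i - 1) ' ') XY then acc + 1
            else if pvInXY (PySem.List.pyGetD s (i + 1) ' ') XY then acc + 1
            else acc)
         else acc) c2
     else c2)
    = pvG false (s.map (fun c => pvInXY c XY)) := by
  obtain ⟨m, hm⟩ : ∃ m, s.length = m + 2 := ⟨s.length - 2, by omega⟩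
  -- abbreviations for the three index functions
  set f : Int → Int := fun i =>
    if pvInXY (PySem.List.pyGetD s i ' ') XY &&
       (pvInXY (PySem.List.pyGetD s (i - 1) ' ') XY || pvInXY (PySem.List.pyGetD s (i + 1) ' ') XY)
    then (1 : Int) else 0 with hf
  -- the loop body is "acc + f i"
  have hbody : (fun (acc : Int) (i : Int) =>
      if pvInXY (PySem.List.pyGetD s i ' ') XY then
        (if pvInXY (PySem.List.pyGetD s (i - 1) ' ') XY then acc + 1
         else if pvInXY (PySem.List.pyGetD s (i + 1) ' ') XY then acc + 1
         else acc)
      else acc) = fun acc i => acc + f i := by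
    funext acc i
    rw [hf]
    by_cases hA : pvInXY (PySem.List.pyGetD s i ' ') XY = true <;>
      by_cases hB : pvInXY (PySem.List.pyGetD s (i - 1) ' ') XY = true <;>
      by_cases hC : pvInXY (PySem.List.pyGetD s (i + 1) ' ') XY = true <;>
      simp [hA, hB, hC]
  -- collapse the n = 2 / n > 2 branch into the fold
  have hfold : ∀ (c : Int), (if 2 < s.length then
       (PySem.List.pyRange 1 ((s.length : Int) - 1) 1).foldl (fun acc i => acc + f i) c
     else c)
      = c + ((List.range m).map (fun (k : Nat) => f (1 + (k : Int)))).sum := by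
    intro c
    by_cases h3 : 2 < s.length
    · rw [if_pos h3, PySem.List.foldl_add _ f c, PySem.List.pyRange_one]
      have : (((s.length : Int) - 1) - 1).toNat = m := by omega
      rw [this, List.map_map]
      simp [Function.comp_def]
    · rw [if_neg h3]
      have hm0 : m = 0 := by omega
      simp [hm0]
  rw [hbody, hfold]
  rw [pvG_sum]
  simp only [List.length_map, hm]
  rw [List.range_succ, List.range_succ_eq_map]
  simp only [List.map_append, List.map_cons, List.map_map, List.sum_append, List.sum_cons,
    List.sum_nil]
  have emid : ∀ k ∈ List.range m, (fun (i : Nat) =>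
        if ((s.map (fun c => pvInXY c XY)).getD i false &&
          ((if i = 0 then false else (s.map (fun c => pvInXY c XY)).getD (i - 1) false) ||
            (s.map (fun c => pvInXY c XY)).getD (i + 1) false)) = true then (1:Int) else 0) (Nat.succ k)
      = f (1 + (k : Int)) := by
    intro k hk
    have hkm : k < m := List.mem_range.mp hk
    have c1 : (1 + (k : Int)) = ((k + 1 : Nat) : Int) := by push_cast; ring
    have c2 : ((k + 1 : Nat) : Int) - 1 = ((k : Nat) : Int) := by push_cast; ring
    have c3 : ((k + 1 : Nat) : Int) + 1 = ((k + 2 : Nat) : Int) := by push_cast; ring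
    rw [hf]
    simp only [c1, c2, c3, PySem.List.pyGetD_natCast]
    have b1 := pvMemGetD s XY (k + 1) (by omega)
    have b2 := pvMemGetD s XY k (by omega)
    have b3 := pvMemGetD s XY (k + 2) (by omega)
    simp only [Nat.succ_eq_add_one, if_neg (by omega : ¬ k + 1 = 0), Nat.add_sub_cancel, b1, b2, b3]
  have hmid : (List.map ((fun (i : Nat) =>
        if ((s.map (fun c => pvInXY c XY)).getD i false &&
          ((if i = 0 then false else (s.map (fun c => pvInXY c XY)).getD (i - 1) false) ||
            (s.map (fun c => pvInXY c XY)).getD (i + 1) false)) = true then (1:Int) else 0) ∘ Nat.succ)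
        (List.range m)).sum
      = (List.map (fun (k : Nat) => f (1 + (k : Int))) (List.range m)).sum := by
    refine congrArg List.sum (List.map_congr_left ?_)
    intro k hk
    exact emid k hk
  rw [hmid]
  have b0 := pvMemGetD s XY 0 (by omega)
  have b1 := pvMemGetD s XY 1 (by omega)
  have bm1 := pvMemGetD s XY (m + 1) (by omega)
  have bm := pvMemGetD s XY m (by omega)
  have bl : (s.map (fun c => pvInXY c XY)).getD (m + 1 + 1) false = false :=
    List.getD_eq_default _ _ (by simp [hm])
  have g0 : PySem.List.pyGetD s (0 : Int) ' ' = s.getD 0 ' ' := by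
    exact_mod_cast PySem.List.pyGetD_natCast s 0 ' '
  have g1 : PySem.List.pyGetD s (1 : Int) ' ' = s.getD 1 ' ' := by
    exact_mod_cast PySem.List.pyGetD_natCast s 1 ' '
  have gm1 : PySem.List.pyGetD s ((↑(m + 2) : Int) - 1) ' ' = s.getD (m + 1) ' ' := by
    rw [show ((↑(m + 2) : Int) - 1) = ((m + 1 : Nat) : Int) by push_cast; ring]
    exact PySem.List.pyGetD_natCast s (m + 1) ' '
  have gm : PySem.List.pyGetD s ((↑(m + 2) : Int) - 2) ' ' = s.getD m ' ' := by
    rw [show ((↑(m + 2) : Int) - 2) = ((m : Nat) : Int) by push_cast; ring]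
    exact PySem.List.pyGetD_natCast s m ' '
  simp only [g0, g1, gm1, gm, if_true, b0, b1, bm1, bm, bl, List.map_nil, List.sum_nil,
    add_zero, Bool.false_or, Bool.or_false, Nat.add_sub_cancel, Nat.zero_add,
    if_neg (show ¬ m + 1 = 0 by omega)]
  by_cases h0 : pvInXY (s.getD 0 ' ') XY = true <;>
    by_cases h1 : pvInXY (s.getD 1 ' ') XY = true <;>
    by_cases h2 : pvInXY (s.getD (m + 1) ' ') XY = true <;>
    by_cases h3 : pvInXY (s.getD m ' ') XY = true <;>
    simp only [h0, h1, h2, h3] <;> norm_num <;> ring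

theorem pvB_eq_pvG (seq XY : String) (hpre : 2 ≤ XY.toList.length) :
    get_pair_repeat_count_alt seq XY = pvG false (seq.toList.map (fun c => pvInXY c XY)) := by
  unfold get_pair_repeat_count_alt
  rw [if_neg (by omega)]
  rw [pvB_loop XY seq.toList 0 0, pvH_eq_pvG _ 0 le_rfl]
  norm_num

-- ===== VERDICT (by name: the statement is the Claim_ definition above) =====
theorem get_pair_repeat_count_spec : Claim_equal_get_pair_repeat_count := by
  intro seq XY _ hpre
  unfold Pre_get_pair_repeat_count at hpre
  show get_pair_repeat_count seq XY = get_pair_repeat_count_alt seq XY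
  rw [pvB_eq_pvG seq XY hpre]
  simp only [get_pair_repeat_count]
  rw [if_neg (by omega)]
  by_cases hlen : seq.toList.length ≤ 1
  · rw [if_pos hlen]
    rcases hsl : seq.toList with _ | ⟨c, _ | ⟨d, t⟩⟩
    · simp [pvG]
    · simp [pvG]
    · rw [hsl] at hlen; simp at hlen
  · rw [if_neg hlen]
    exact pvA_main seq.toList XY (by omega)
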